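-- pv_equiv track=rewrite | github.com/xiyaozhuang/aoc25 | src/aoc25/day06.py | part2
-- ===== SOURCE A (Python) =====
-- def part2(data):
--     worksheet = [row[::-1] for row in data]
--     operators = [character for character in worksheet[-1] if character != " "]
--     operator_ranges = [(None, -1)]
--
--     for i in range(len(worksheet[-1])):
--         if worksheet[-1][i] != " ":
--             end = i + 1
--             start = operator_ranges[-1][1] + 1
--
--             operator_ranges.append((start, end))
--
--     operator_ranges.pop(0)
--
--     groups = []
--
--     for i in range(len(operator_ranges)):
--         start = operator_ranges[i][0]
--         end = operator_ranges[i][1]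
--
--         group = []
--
--         for j in range(start, end):
--             string = ""
--
--             for row in worksheet[:-1]:
--                 string += row[j]
--
--             if len(string.strip()) > 0:
--                 group.append(int(string.strip()))
--
--         groups.append(group)
--
--     total = 0
--
--     for i in range(len(operators)):
--         operator = operators[i]
--         group = groups[i]
--
--         if operator == "+":
--             add = 0
--
--             for number in group:
--                 add += number
--
--             total += add
--
--         elif operator == "*":
--             mul = 1
--
--             for number in group:
--                 mul *= number
--
--             total += mul
--
--     return total
-- ===== SOURCE B (Python) =====
-- def part2(data):
--     rows = [row[::-1] for row in data[:-1]]
--     ops = data[-1][::-1].rstrip(" ")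
--     total = 0
--     group = []
--     prev = " "
--     for j, c in enumerate(ops):
--         if prev == " ":  # the column right after an operator is a separator: never read
--             s = "".join(row[j] for row in rows).strip()
--             if s:
--                 group.append(int(s))
--         if c != " ":
--             if c == "+":
--                 total += sum(group)
--             elif c == "*":
--                 p = 1
--                 for n in group:
--                     p *= n
--                 total += p
--             group = []
--         prev = c
--     return total
-- ===== Notes on version B (the rewrite author's own statement) =====
-- stated objective: alternative
-- what changed: A's three phases (build an operator-range list, then a list of per-range groups, then a summing loop over ranges) are fused into one left-to-right column-major pass over the reversed operator row that accumulates the current group (skipping the separator column right after each operator) and folds it into the total the moment its operator column is reached, so no range or group lists are materialized.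
import Mathlib
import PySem

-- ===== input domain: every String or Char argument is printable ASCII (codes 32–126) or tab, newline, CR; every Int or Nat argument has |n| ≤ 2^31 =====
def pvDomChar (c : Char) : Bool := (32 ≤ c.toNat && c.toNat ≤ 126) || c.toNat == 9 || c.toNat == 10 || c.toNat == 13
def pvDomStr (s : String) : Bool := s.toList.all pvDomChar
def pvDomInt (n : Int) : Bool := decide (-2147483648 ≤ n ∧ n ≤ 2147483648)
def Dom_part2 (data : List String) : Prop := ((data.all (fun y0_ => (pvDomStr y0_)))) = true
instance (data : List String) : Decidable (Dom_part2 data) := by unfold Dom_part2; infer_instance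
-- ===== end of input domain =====

-- B replaces A's three phases (operator-range list, group list, total loop) by one fused
-- column-major pass that folds each group as soon as its operator column is reached (objective: alternative).

-- ===== PORT A =====
-- literal transliteration of Source A's part2; the initial tuple (None, -1) only ever has its
-- second component read, so the never-read None is represented by 0
def part2 (data : List String) : Int :=
  let worksheet := data.map (fun row => row.toList.reverse)      -- [row[::-1] for row in data]
  let lastRow := worksheet.getLastD []                           -- worksheet[-1]; IndexError (data = []) is outside Pre_
  let operators := lastRow.filter (fun c => c ≠ ' ')
  let ranges := ((List.range lastRow.length).foldl
      (fun acc i =>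
        if lastRow.getD i ' ' ≠ ' ' then
          acc ++ [((acc.getLastD (0, -1)).2 + 1, (i : Int) + 1)]
        else acc)
      [((0 : Int), (-1 : Int))]).drop 1                          -- operator_ranges, then .pop(0)
  let groups := ranges.map (fun r =>
      (PySem.List.pyRange r.1 r.2 1).foldl (fun g j =>
        let s := PySem.Chars.strip
          (worksheet.dropLast.foldl (fun str row => str ++ [PySem.List.pyGetD row j ' ']) [])
        if 0 < s.length then g ++ [(PySem.Int.ofChars? s).getD 0] else g) [])
  (List.range operators.length).foldl
    (fun total i =>
      let op := operators.getD i ' '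
      let group := groups.getD i []
      if op = '+' then total + group.foldl (· + ·) 0
      else if op = '*' then total + group.foldl (· * ·) 1
      else total) 0

-- ===== PORT B =====
-- the fused for-loop of Source B: j/prev/total/group are the loop state, cs the remaining operator row
def pvLoopB (rows : List (List Char)) : Nat → Char → Int → List Int → List Char → Int
  | _, _, total, _, [] => total
  | j, prev, total, group, c :: cs =>
      let group1 :=
        if prev = ' ' then
          let s := PySem.Chars.strip (rows.map (fun row => PySem.List.pyGetD row (j : Int) ' '))
          if s ≠ [] then group ++ [(PySem.Int.ofChars? s).getD 0] else group
        else group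
      let total1 :=
        if c ≠ ' ' then
          if c = '+' then total + group1.foldl (· + ·) 0
          else if c = '*' then total + group1.foldl (· * ·) 1
          else total
        else total
      let group2 := if c ≠ ' ' then [] else group1
      pvLoopB rows (j + 1) c total1 group2 cs

def part2_alt (data : List String) : Int :=
  let rows := data.dropLast.map (fun row => row.toList.reverse)  -- [row[::-1] for row in data[:-1]]
  -- data[-1][::-1].rstrip(" ") — exact: reversing then right-stripping spaces is
  -- dropping the leading spaces of the original last row, then reversing
  let ops := ((data.getLastD "").toList.dropWhile (fun c => c = ' ')).reverse
  pvLoopB rows 0 ' ' 0 [] ops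

-- ===== PRECONDITION & SPEC =====
-- Pre_ excludes exactly the inputs where the Python A raises: the empty list (IndexError on
-- worksheet[-1]) and inputs where a column A actually reads is missing in some row (IndexError)
-- or holds a non-empty string int() rejects (ValueError).
def Pre_part2 (data : List String) : Prop :=
  data ≠ [] ∧
  ∀ j : Nat, j < ((data.getLastD "").toList.dropWhile (fun c => c = ' ')).length →
    (j = 0 ∨ (data.getLastD "").toList.reverse.getD (j - 1) ' ' = ' ') →
    ((∀ row ∈ data.dropLast, j < row.length) ∧
     (PySem.Chars.strip ((data.dropLast).map (fun row => row.toList.reverse.getD j ' ')) = [] ∨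
      (PySem.Int.ofChars? (PySem.Chars.strip
        ((data.dropLast).map (fun row => row.toList.reverse.getD j ' ')))).isSome))
instance (data : List String) : Decidable (Pre_part2 data) := by unfold Pre_part2; infer_instance

def pvWitness_part2 : List String := ["1", "+"]

def Spec_part2 (data : List String) (out : Int) : Prop := out = part2_alt data
instance (data : List String) (out : Int) : Decidable (Spec_part2 data out) := by unfold Spec_part2; infer_instance

-- ===== CLAIM (what is proved, stated in full; the proofs are below) =====
def Claim_equal_part2 : Prop := ∀ (data : List String), Dom_part2 data → Pre_part2 data → Spec_part2 data (part2 data)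

-- ===== LEMMAS AND PROOFS =====

-- push the value of column j (blank columns skipped) onto a group — the shared column read
def pvPush (rows : List (List Char)) (g : List Int) (j : Int) : List Int :=
  let s := PySem.Chars.strip (rows.map (fun row => PySem.List.pyGetD row j ' '))
  if s ≠ [] then g ++ [(PySem.Int.ofChars? s).getD 0] else g

def pvOpval (c : Char) (g : List Int) : Int :=
  if c = '+' then g.foldl (· + ·) 0 else if c = '*' then g.foldl (· * ·) 1 else 0

-- the non-space characters of a char list together with their positions (offset j)
def pvPos (j : Nat) : List Char → List (Char × Nat)
  | [] => []
  | c :: cs => if c ≠ ' ' then (c, j) :: pvPos (j + 1) cs else pvPos (j + 1) cs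

def pvMkRanges (s : Int) : List (Char × Nat) → List (Int × Int)
  | [] => []
  | (_, p) :: rest => (s, (p : Int) + 1) :: pvMkRanges ((p : Int) + 2) rest

def pvGroupOf (rows : List (List Char)) (r : Int × Int) : List Int :=
  (PySem.List.pyRange r.1 r.2 1).foldl (pvPush rows) []

-- the common normal form: total contributed by the operators at positions PS,
-- the first group seeded with g and its columns starting at s
def pvTot (rows : List (List Char)) (g : List Int) (s : Int) : List (Char × Nat) → Int
  | [] => 0
  | (c, p) :: rest =>
      pvOpval c ((PySem.List.pyRange s ((p : Int) + 1) 1).foldl (pvPush rows) g)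
      + pvTot rows [] ((p : Int) + 2) rest

lemma pv_filter_eq_map_fst (cs : List Char) : ∀ j : Nat,
    cs.filter (fun c => c ≠ ' ') = (pvPos j cs).map Prod.fst := by
  induction cs with
  | nil => intro j; rfl
  | cons c cs ih =>
      intro j
      simp only [List.filter_cons, pvPos]
      by_cases h : c = ' ' <;> simp [h] <;> simpa using ih (j + 1)

lemma pv_pos_ge (cs : List Char) : ∀ (j : Nat) (q : Char × Nat), q ∈ pvPos j cs → j ≤ q.2 := by
  induction cs with
  | nil => intro j q h; simp [pvPos] at h
  | cons c cs ih =>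
      intro j q h
      simp only [pvPos] at h
      by_cases hc : c = ' '
      · simp [hc] at h; exact Nat.le_of_succ_le (ih (j + 1) q h)
      · simp [hc] at h
        rcases h with h | h
        · simp [h]
        · exact Nat.le_of_succ_le (ih (j + 1) q h)

lemma pv_pos_append (xs : List Char) : ∀ (ys : List Char) (j : Nat),
    pvPos j (xs ++ ys) = pvPos j xs ++ pvPos (j + xs.length) ys := by
  induction xs with
  | nil => intro ys j; simp [pvPos]
  | cons x xs ih =>
      intro ys j
      simp only [List.cons_append, pvPos, ih ys (j + 1)]
      have h : j + 1 + xs.length = j + (xs.length + 1) := by omega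
      by_cases hx : x = ' ' <;> simp [hx, h]

lemma pv_pos_spaces (ys : List Char) : ∀ j : Nat, (∀ c ∈ ys, c = ' ') → pvPos j ys = [] := by
  induction ys with
  | nil => intro j _; rfl
  | cons y ys ih =>
      intro j h
      have hy := h y (by simp)
      simp only [pvPos, hy]
      simp [ih (j + 1) (fun c hc => h c (by simp [hc]))]

-- a 'for i in range(len(xs))' fold reading xs[i] is a fold over xs.zipIdx
lemma pv_foldl_range_zipIdx_aux {α β : Type} (F : β → Nat → α → β) (d : α) :
    ∀ (xs : List α) (s : Nat) (a : β),
      (List.range xs.length).foldl (fun acc i => F acc (i + s) (xs.getD i d)) a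
        = (xs.zipIdx s).foldl (fun acc p => F acc p.2 p.1) a := by
  intro xs
  induction xs with
  | nil => intro s a; rfl
  | cons x xs ih =>
      intro s a
      rw [List.length_cons, List.range_succ_eq_map]
      simp only [List.foldl_cons, List.foldl_map, List.getD_cons_zero, List.getD_cons_succ,
        List.zipIdx_cons, Nat.zero_add]
      have h : ∀ (i : Nat), Nat.succ i + s = i + (s + 1) := by omega
      simp only [h]
      exact ih (s + 1) (F a s x)

lemma pv_foldl_range_zipIdx {α β : Type} (F : β → Nat → α → β) (d : α) (xs : List α) (a : β) :
    (List.range xs.length).foldl (fun acc i => F acc i (xs.getD i d)) a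
      = (xs.zipIdx 0).foldl (fun acc p => F acc p.2 p.1) a :=
  pv_foldl_range_zipIdx_aux F d xs 0 a

-- a 'for i in range(len(xs))' fold reading xs[i] and ys[i] is a fold over xs.zip ys
lemma pv_foldl_range_zip {α β γ : Type} (F : γ → α → β → γ) (d1 : α) (d2 : β) :
    ∀ (xs : List α) (ys : List β) (a : γ), xs.length = ys.length →
      (List.range xs.length).foldl (fun t i => F t (xs.getD i d1) (ys.getD i d2)) a
        = (xs.zip ys).foldl (fun t p => F t p.1 p.2) a := by
  intro xs
  induction xs with
  | nil => intro ys a _; rfl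
  | cons x xs ih =>
      intro ys a hlen
      cases ys with
      | nil => simp at hlen
      | cons y ys =>
          rw [List.length_cons, List.range_succ_eq_map]
          simp only [List.foldl_cons, List.foldl_map, List.getD_cons_zero, List.getD_cons_succ,
            List.zip_cons_cons]
          exact ih ys (F a x y) (by simpa using hlen)

-- A's operator_ranges loop builds pvMkRanges
lemma pv_ranges_fold : ∀ (cs : List Char) (j : Nat) (pre : List (Int × Int)) (e : Int),
    (pre.getLastD (0, -1)).2 = e →
    (cs.zipIdx j).foldl
      (fun acc p =>
        if p.1 ≠ ' ' then acc ++ [((acc.getLastD (0, -1)).2 + 1, (p.2 : Int) + 1)] else acc)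
      pre
      = pre ++ pvMkRanges (e + 1) (pvPos j cs) := by
  intro cs
  induction cs with
  | nil => intro j pre e _; simp [pvPos, pvMkRanges]
  | cons c cs ih =>
      intro j pre e he
      rw [List.zipIdx_cons, List.foldl_cons]
      by_cases hc : c = ' '
      · rw [if_neg (by simp [hc]), ih (j + 1) pre e he]
        simp [pvPos, hc]
      · rw [if_pos (by simpa using hc), he,
          ih (j + 1) (pre ++ [(e + 1, (j : Int) + 1)]) ((j : Int) + 1) (by rw [List.getLastD_concat])]
        have h2 : (j : Int) + 1 + 1 = (j : Int) + 2 := by ring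
        simp [pvPos, pvMkRanges, hc, h2]

lemma pv_len_mkRanges : ∀ (PS : List (Char × Nat)) (s : Int), (pvMkRanges s PS).length = PS.length := by
  intro PS
  induction PS with
  | nil => intro s; rfl
  | cons q PS ih => intro s; obtain ⟨c, p⟩ := q; simp [pvMkRanges, ih]

-- A's final loop over zip(operators, groups) computes pvTot
lemma pv_zip_fold_tot (rows : List (List Char)) : ∀ (PS : List (Char × Nat)) (s : Int) (a : Int),
    ((PS.map Prod.fst).zip ((pvMkRanges s PS).map (pvGroupOf rows))).foldl
      (fun total pr =>
        if pr.1 = '+' then total + pr.2.foldl (· + ·) 0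
        else if pr.1 = '*' then total + pr.2.foldl (· * ·) 1
        else total) a
    = a + pvTot rows [] s PS := by
  intro PS
  induction PS with
  | nil => intro s a; simp [pvTot]
  | cons q PS ih =>
      intro s a
      obtain ⟨c, p⟩ := q
      simp only [List.map_cons, pvMkRanges, List.zip_cons_cons, List.foldl_cons]
      rw [ih]
      show _ = a + pvTot rows [] s ((c, p) :: PS)
      simp only [pvTot, pvOpval, pvGroupOf]
      split_ifs <;> ring

-- one step of B's loop, with the column push named
lemma pvLoopB_cons (rows : List (List Char)) (j : Nat) (prev c : Char) (total : Int)
    (g : List Int) (cs : List Char) :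
    pvLoopB rows j prev total g (c :: cs) =
      (let G := if prev = ' ' then pvPush rows g (j : Int) else g
       pvLoopB rows (j + 1) c
        (if c ≠ ' ' then
           if c = '+' then total + G.foldl (· + ·) 0
           else if c = '*' then total + G.foldl (· * ·) 1
           else total
         else total)
        (if c ≠ ' ' then [] else G) cs) := rfl

-- B's fused loop computes pvTot
lemma pv_loopB_eq_tot (rows : List (List Char)) :
    ∀ (cs : List Char) (j : Nat) (prev : Char) (total : Int) (g : List Int),
      pvLoopB rows j prev total g cs
        = total + pvTot rows g (if prev = ' ' then (j : Int) else (j : Int) + 1) (pvPos j cs) := by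
  intro cs
  induction cs with
  | nil => intro j prev total g; simp [pvLoopB, pvPos, pvTot]
  | cons c cs ih =>
      intro j prev total g
      rw [pvLoopB_cons]
      simp only []
      by_cases hc : c = ' '
      · subst hc
        rw [if_neg (by simp : ¬(' ' ≠ ' ')), if_neg (by simp : ¬(' ' ≠ ' '))]
        rw [ih]
        have hpos : pvPos j (' ' :: cs) = pvPos (j + 1) cs := by simp [pvPos]
        rw [hpos]
        congr 1
        rw [if_pos rfl]
        cases hps : pvPos (j + 1) cs with
        | nil => simp [pvTot]
        | cons q rest =>
            obtain ⟨c2, p2⟩ := q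
            have hp2 : j + 1 ≤ p2 := by
              have := pv_pos_ge cs (j + 1) (c2, p2) (by rw [hps]; exact List.mem_cons_self ..)
              simpa using this
            have hkey : (PySem.List.pyRange ((j + 1 : Nat) : Int) ((p2 : Int) + 1) 1).foldl (pvPush rows)
                (if prev = ' ' then pvPush rows g (j : Int) else g)
                = (PySem.List.pyRange (if prev = ' ' then (j : Int) else (j : Int) + 1) ((p2 : Int) + 1) 1).foldl
                  (pvPush rows) g := by
              by_cases hp : prev = ' '
              · rw [if_pos hp, if_pos hp,
                  PySem.List.pyRange_one_cons (show (j : Int) < (p2 : Int) + 1 by omega)]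
                simp only [List.foldl_cons]
                norm_cast
              · rw [if_neg hp, if_neg hp]
                norm_cast
            simp only [pvTot, hkey]
      · rw [if_pos hc, if_pos hc]
        rw [ih]
        have hcast : ((j : Int) + 1) + 1 = (j : Int) + 2 := by ring
        simp only [if_neg hc, Nat.cast_add, Nat.cast_one, hcast]
        have hfold : (PySem.List.pyRange (if prev = ' ' then (j : Int) else (j : Int) + 1)
            ((j : Int) + 1) 1).foldl (pvPush rows) g
            = (if prev = ' ' then pvPush rows g (j : Int) else g) := by
          by_cases hp : prev = ' '
          · rw [if_pos hp, if_pos hp, PySem.List.pyRange_one_singleton]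
            simp
          · rw [if_neg hp, if_neg hp, PySem.List.pyRange_one_eq_nil le_rfl]
            rfl
        have hpos : pvPos j (c :: cs) = (c, j) :: pvPos (j + 1) cs := by simp [pvPos, hc]
        rw [hpos]
        simp only [pvTot, hfold, pvOpval]
        split_ifs <;> ring

-- A's whole body (ζ-reduced), over an arbitrary reversed worksheet rows / reversed last row L
lemma pv_partA_core (rows : List (List Char)) (L : List Char) :
    (List.range (L.filter (fun c => c ≠ ' ')).length).foldl
      (fun total i =>
        if (L.filter (fun c => c ≠ ' ')).getD i ' ' = '+' then
          total + ((((((List.range L.length).foldl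
              (fun acc i =>
                if L.getD i ' ' ≠ ' ' then
                  acc ++ [((acc.getLastD (0, -1)).2 + 1, (i : Int) + 1)]
                else acc)
              [((0 : Int), (-1 : Int))]).drop 1).map (fun r =>
                (PySem.List.pyRange r.1 r.2 1).foldl (fun g j =>
                  if 0 < (PySem.Chars.strip
                      (rows.foldl (fun str row => str ++ [PySem.List.pyGetD row j ' ']) [])).length then
                    g ++ [(PySem.Int.ofChars? (PySem.Chars.strip
                      (rows.foldl (fun str row => str ++ [PySem.List.pyGetD row j ' ']) []))).getD 0]
                  else g) [])).getD i [])).foldl (· + ·) 0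
        else if (L.filter (fun c => c ≠ ' ')).getD i ' ' = '*' then
          total + ((((((List.range L.length).foldl
              (fun acc i =>
                if L.getD i ' ' ≠ ' ' then
                  acc ++ [((acc.getLastD (0, -1)).2 + 1, (i : Int) + 1)]
                else acc)
              [((0 : Int), (-1 : Int))]).drop 1).map (fun r =>
                (PySem.List.pyRange r.1 r.2 1).foldl (fun g j =>
                  if 0 < (PySem.Chars.strip
                      (rows.foldl (fun str row => str ++ [PySem.List.pyGetD row j ' ']) [])).length then
                    g ++ [(PySem.Int.ofChars? (PySem.Chars.strip
                      (rows.foldl (fun str row => str ++ [PySem.List.pyGetD row j ' ']) []))).getD 0]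
                  else g) [])).getD i [])).foldl (· * ·) 1
        else total) 0
    = pvTot rows [] 0 (pvPos 0 L) := by
  have hpush : (fun (g : List Int) (j : Int) =>
      if 0 < (PySem.Chars.strip
          (rows.foldl (fun str row => str ++ [PySem.List.pyGetD row j ' ']) [])).length then
        g ++ [(PySem.Int.ofChars? (PySem.Chars.strip
          (rows.foldl (fun str row => str ++ [PySem.List.pyGetD row j ' ']) []))).getD 0]
      else g) = pvPush rows := by
    funext g j
    rw [PySem.List.foldl_append_singleton_eq_map]
    simp [pvPush, List.length_pos_iff]
  rw [hpush]
  have hgroupOf : (fun r : Int × Int => (PySem.List.pyRange r.1 r.2 1).foldl (pvPush rows) [])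
      = pvGroupOf rows := funext fun r => rfl
  rw [hgroupOf]
  have hranges : ((List.range L.length).foldl
      (fun acc i =>
        if L.getD i ' ' ≠ ' ' then
          acc ++ [((acc.getLastD (0, -1)).2 + 1, (i : Int) + 1)]
        else acc)
      [((0 : Int), (-1 : Int))]).drop 1 = pvMkRanges 0 (pvPos 0 L) := by
    rw [pv_foldl_range_zipIdx
      (F := fun acc (i : Nat) (c : Char) =>
        if c ≠ ' ' then acc ++ [((acc.getLastD (0, -1)).2 + 1, (i : Int) + 1)] else acc)
      (d := ' ') L [((0 : Int), (-1 : Int))]]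
    rw [pv_ranges_fold L 0 [((0 : Int), (-1 : Int))] (-1) rfl]
    norm_num
  rw [hranges, pv_filter_eq_map_fst L 0]
  rw [pv_foldl_range_zip
    (F := fun t (op : Char) (group : List Int) =>
      if op = '+' then t + group.foldl (· + ·) 0
      else if op = '*' then t + group.foldl (· * ·) 1
      else t) ' ' []
    ((pvPos 0 L).map Prod.fst) ((pvMkRanges 0 (pvPos 0 L)).map (pvGroupOf rows)) 0
    (by simp [pv_len_mkRanges])]
  rw [pv_zip_fold_tot]
  simp

theorem part2_unconditional (data : List String) : part2 data = part2_alt data := by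
  have hA : part2 data =
      pvTot ((data.map (fun row => row.toList.reverse)).dropLast) [] 0
        (pvPos 0 ((data.map (fun row => row.toList.reverse)).getLastD [])) :=
    pv_partA_core _ _
  have hB : part2_alt data =
      pvTot (data.dropLast.map (fun row => row.toList.reverse)) [] 0
        (pvPos 0 (((data.getLastD "").toList.dropWhile (fun c => c = ' ')).reverse)) := by
    have h := pv_loopB_eq_tot (data.dropLast.map (fun row => row.toList.reverse))
      (((data.getLastD "").toList.dropWhile (fun c => c = ' ')).reverse) 0 ' ' 0 []
    simpa [part2_alt] using h
  rw [hA, hB]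
  have hrows : (data.map (fun row : String => row.toList.reverse)).dropLast
      = data.dropLast.map (fun row => row.toList.reverse) := by
    rw [List.map_dropLast]
  have hlast : (data.map (fun row : String => row.toList.reverse)).getLastD []
      = ((data.getLastD "").toList).reverse := by
    rw [List.getLastD_eq_getLast?, List.getLastD_eq_getLast?, List.getLast?_map]
    cases data.getLast? <;> simp
  rw [hrows, hlast]
  have hsplit : ((data.getLastD "").toList).reverse
      = (((data.getLastD "").toList.dropWhile (fun c => c = ' ')).reverse)
        ++ (((data.getLastD "").toList.takeWhile (fun c => c = ' ')).reverse) := by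
    rw [← List.reverse_append, List.takeWhile_append_dropWhile]
  rw [hsplit, pv_pos_append]
  rw [pv_pos_spaces (((data.getLastD "").toList.takeWhile (fun c => c = ' ')).reverse) _
    (fun c hc => by
      have := List.mem_takeWhile_imp (List.mem_reverse.mp hc)
      simpa using this)]
  rw [List.append_nil]

-- ===== VERDICT (by name: the statement is the Claim_ definition above) =====
theorem part2_spec : Claim_equal_part2 := by
  intro data _ _
  exact part2_unconditional data
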